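-- pv_equiv track=rewrite | github.com/redpanda-ai/Meerkat | meerkat/classification/bloom_filter/find_entities.py | tag_text
-- ===== SOURCE A (Python) =====
-- def tag_text(text):
-- 	'''make tag for text'''
-- 	text = text.replace('\'', '')
-- 	for mark in '!"#$%&\'()*+,-./:;<=>?@[\]^_`{|}~':
-- 		text = text.replace(mark, ' ')
-- 	text = text.strip()
-- 	tag = ''
-- 	for i in range(len(text)):
-- 		if text[i] == ' ':
-- 			continue
-- 		elif i == 0 or text[i - 1] == ' ':
-- 			tag += 'B'
-- 		else:
-- 			tag += 'C'
-- 	return tag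
-- ===== SOURCE B (Python) =====
-- PUNCT = set('!"#$%&\'()*+,-./:;<=>?@[\\]^_`{|}~')
--
-- def tag_text(text):
--     cleaned = ''.join(' ' if c in PUNCT else c for c in text if c != "'").strip()
--     return ''.join('B' + 'C' * (len(w) - 1) for w in cleaned.split(' ') if w)
-- ===== Notes on version B (the rewrite author's own statement) =====
-- stated objective: simpler
-- what changed: B cleans the text in one comprehension pass (dropping apostrophes, mapping each punctuation mark to a space) instead of 33 whole-string replace passes, then splits the cleaned text on single spaces and emits a begin tag plus continuation tags per word instead of A's index loop that re-inspects the previous character.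
import Mathlib
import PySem

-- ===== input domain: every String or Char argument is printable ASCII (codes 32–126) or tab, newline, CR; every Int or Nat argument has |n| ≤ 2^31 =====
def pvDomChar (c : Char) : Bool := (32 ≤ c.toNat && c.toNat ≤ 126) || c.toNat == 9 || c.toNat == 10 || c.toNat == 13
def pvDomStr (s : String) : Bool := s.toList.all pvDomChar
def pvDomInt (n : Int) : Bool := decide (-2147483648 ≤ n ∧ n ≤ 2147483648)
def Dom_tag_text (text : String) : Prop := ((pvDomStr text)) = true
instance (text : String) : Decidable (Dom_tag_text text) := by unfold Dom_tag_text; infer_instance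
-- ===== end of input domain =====

-- B replaces A's 32 whole-string .replace passes by one cleaning pass and A's
-- index loop (with its previous-character test) by split(' ') + a per-word tag; equal return value proved.

-- ===== PORT A =====
def tag_text (text : String) : String :=
  let t1 := PySem.Str.replace text "'" ""
  let t2 := "!\"#$%&'()*+,-./:;<=>?@[\\]^_`{|}~".toList.foldl
      (fun t m => PySem.Str.replace t (String.ofList [m]) " ") t1
  let t3 := PySem.Str.strip t2
  let cs := t3.toList
  String.ofList ((PySem.List.pyRange 0 cs.length 1).foldl
    (fun tag i =>
      if PySem.List.pyGetD cs i ' ' = ' ' then tag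
      else if i = 0 ∨ PySem.List.pyGetD cs (i - 1) ' ' = ' ' then tag ++ ['B']
      else tag ++ ['C']) [])

-- ===== PORT B =====
def pvPunct : List Char := "!\"#$%&'()*+,-./:;<=>?@[\\]^_`{|}~".toList

def tag_text_alt (text : String) : String :=
  let cleaned := PySem.Chars.strip
      ((text.toList.filter (fun c => c != '\'')).map (fun c => if c ∈ pvPunct then ' ' else c))
  let words := PySem.Chars.splitOn cleaned [' ']
  String.ofList (PySem.Chars.join []
    ((words.filter (fun w => w != [])).map (fun w => 'B' :: List.replicate (w.length - 1) 'C')))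

-- ===== PRECONDITION & SPEC =====
def Spec_tag_text (text : String) (out : String) : Prop := out = tag_text_alt text
instance (text : String) (out : String) : Decidable (Spec_tag_text text out) := by unfold Spec_tag_text; infer_instance

-- ===== CLAIM (what is proved, stated in full; the proofs are below) =====
def Claim_equal_tag_text : Prop := ∀ (text : String), Dom_tag_text text → Spec_tag_text text (tag_text text)

-- ===== LEMMAS AND PROOFS =====

/-- One step of A's tagging loop, as structural recursion with the previous character. -/
def pvTagRec (prev : Char) : List Char → List Char
  | [] => []
  | c :: rest =>
      (if c = ' ' then [] else if prev = ' ' then ['B'] else ['C']) ++ pvTagRec c rest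

/-- split-on-single-space as plain structural recursion (word accumulator kept in order). -/
def pvSplitSp (cur : List Char) : List Char → List (List Char)
  | [] => [cur]
  | c :: rest => if c = ' ' then cur :: pvSplitSp [] rest else pvSplitSp (cur ++ [c]) rest

lemma pvReplace_go_single (c : Char) (new : List Char) :
    ∀ fuel (l acc : List Char), l.length ≤ fuel →
      PySem.Chars.replace.go [c] new fuel l acc
        = acc.reverse ++ l.flatMap (fun x => if x = c then new else [x]) := by
  intro fuel
  induction fuel with
  | zero => intro l acc h; cases l with
      | nil => simp [PySem.Chars.replace.go]
      | cons x t => simp at h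
  | succ n ih =>
      intro l acc h
      cases l with
      | nil => simp [PySem.Chars.replace.go]
      | cons x t =>
        simp only [PySem.Chars.replace.go]
        by_cases hx : x = c
        · subst hx
          have : List.isPrefixOf [x] (x :: t) = true := by
            simp [List.isPrefixOf]
          simp only [this, if_pos]
          rw [ih _ _ (by simpa using Nat.le_of_succ_le_succ h)]
          simp
        · have : List.isPrefixOf [c] (x :: t) = false := by
            simp [List.isPrefixOf]
            intro hc; exact absurd hc.symm hx
          simp only [this, Bool.false_eq_true, if_false]
          rw [ih _ _ (by simpa using Nat.le_of_succ_le_succ h)]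
          simp [hx]

lemma pvReplace_single (cs : List Char) (c : Char) (new : List Char) :
    PySem.Chars.replace cs [c] new = cs.flatMap (fun x => if x = c then new else [x]) := by
  unfold PySem.Chars.replace
  simp only [List.isEmpty, Bool.false_eq_true, if_false]
  exact pvReplace_go_single c new cs.length cs [] le_rfl

lemma pvReplace_del (cs : List Char) (c : Char) :
    PySem.Chars.replace cs [c] [] = cs.filter (fun x => x != c) := by
  rw [pvReplace_single]
  induction cs with
  | nil => rfl
  | cons x t ih =>
      simp only [List.flatMap_cons, List.filter_cons, ih]
      by_cases hx : x = c
      · simp [hx]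
      · simp [hx]

lemma pvReplace_subst (cs : List Char) (c d : Char) :
    PySem.Chars.replace cs [c] [d] = cs.map (fun x => if x = c then d else x) := by
  rw [pvReplace_single]
  induction cs with
  | nil => rfl
  | cons x t ih => by_cases hx : x = c <;> simp [List.flatMap_cons, hx, ih]

/-- A chain of single-char-to-space substitutions is one map (space itself never substituted). -/
lemma pvSubstFold (ms : List Char) (hms : ' ' ∉ ms) :
    ∀ l : List Char,
      ms.foldl (fun t m => t.map (fun x => if x = m then ' ' else x)) l
        = l.map (fun x => if x ∈ ms then ' ' else x) := by
  induction ms with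
  | nil => intro l; simp
  | cons m ms' ih =>
      intro l
      have hsp : ' ' ∉ ms' := fun h => hms (List.mem_cons_of_mem _ h)
      have hmsp : (' ' : Char) ≠ m := fun h => hms (h ▸ List.mem_cons_self)
      simp only [List.foldl_cons]
      rw [ih hsp, List.map_map]
      apply List.map_congr_left
      intro x _
      by_cases hx : x = m
      · subst hx
        have h2 : ((' ' : Char) ∈ ms') = False := eq_false hsp
        simp [h2]
      · simp [hx]

lemma pvSplit_go_space :
    ∀ fuel (l cur : List Char) (acc : List (List Char)), l.length ≤ fuel →
      PySem.Chars.splitOn.go [' '] fuel l cur acc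
        = acc.reverse ++ pvSplitSp cur.reverse l := by
  intro fuel
  induction fuel with
  | zero => intro l cur acc h; cases l with
      | nil => simp [PySem.Chars.splitOn.go, pvSplitSp]
      | cons x t => simp at h
  | succ n ih =>
      intro l cur acc h
      cases l with
      | nil => simp [PySem.Chars.splitOn.go, pvSplitSp]
      | cons x t =>
        simp only [PySem.Chars.splitOn.go]
        by_cases hx : x = ' '
        · subst hx
          have hp : List.isPrefixOf [' '] (' ' :: t) = true := by simp [List.isPrefixOf]
          simp only [hp, if_pos]
          rw [ih _ _ _ (by simpa using Nat.le_of_succ_le_succ h)]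
          simp [pvSplitSp]
        · have hp : List.isPrefixOf [' '] (x :: t) = false := by
            simp [List.isPrefixOf]
            intro hc; exact absurd hc.symm hx
          simp only [hp, Bool.false_eq_true, if_false]
          rw [ih _ _ _ (by simpa using Nat.le_of_succ_le_succ h)]
          simp [pvSplitSp, hx]

lemma pvSplitOn_space (cs : List Char) :
    PySem.Chars.splitOn cs [' '] = pvSplitSp [] cs := by
  unfold PySem.Chars.splitOn
  rw [pvSplit_go_space (cs.length + 1) cs [] [] (Nat.le_succ _)]
  simp

/-- word tag. -/
def pvWt (w : List Char) : List Char := 'B' :: List.replicate (w.length - 1) 'C'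

lemma pvJoinNil (parts : List (List Char)) : PySem.Chars.join [] parts = parts.flatten := by
  simp only [PySem.Chars.join, List.intercalate]
  induction parts with
  | nil => rfl
  | cons p ps ih =>
      cases ps with
      | nil => rfl
      | cons q qs => simp [List.intersperse_cons₂] at ih ⊢; exact ih

lemma pvTagRec_congr (a b : Char) (ha : a ≠ ' ') (hb : b ≠ ' ') (cs : List Char) :
    pvTagRec a cs = pvTagRec b cs := by
  cases cs with
  | nil => rfl
  | cons c t => simp [pvTagRec, ha, hb]

/-- The per-word tags of split(' ') concatenate to A's scan. -/
lemma pvSplit_tag (cs : List Char) :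
    ∀ cur : List Char,
      (((pvSplitSp cur cs).filter (fun w => w != [])).map pvWt).flatten
        = (if cur = [] then [] else pvWt cur) ++ pvTagRec (if cur = [] then ' ' else 'x') cs := by
  induction cs with
  | nil =>
      intro cur
      by_cases hc : cur = [] <;> simp [pvSplitSp, pvTagRec, hc]
  | cons c t ih =>
      intro cur
      by_cases hsp : c = ' '
      · subst hsp
        by_cases hc : cur = []
        · subst hc
          simpa [pvSplitSp, pvTagRec] using ih []
        · simp only [pvSplitSp]
          have := ih []
          simp [hc, this, pvTagRec]
      · by_cases hc : cur = []
        · subst hc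
          have := ih [c]
          simp only [pvSplitSp, if_neg hsp, List.nil_append]
          rw [this]
          simp only [if_neg (by simp : ([c] : List Char) ≠ [])]
          simp [pvWt, pvTagRec, hsp, pvTagRec_congr c 'x' hsp (by decide) t]
        · have := ih (cur ++ [c])
          simp only [pvSplitSp, if_neg hsp]
          rw [this]
          simp only [if_neg (by simp : cur ++ [c] ≠ []), if_neg hc]
          have hwt : pvWt (cur ++ [c]) = pvWt cur ++ ['C'] := by
            simp only [pvWt, List.length_append, List.length_cons, List.length_nil]
            have h1 : cur.length + 1 - 1 = (cur.length - 1) + 1 := by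
              have : 1 ≤ cur.length := List.length_pos_of_ne_nil hc
              omega
            rw [h1, List.replicate_succ']
            simp
          rw [hwt]
          simp [pvTagRec, hsp, pvTagRec_congr c 'x' hsp (by decide) t]

/-- A's index loop equals the prev-character recursion. -/
lemma pvLoop_eq_tagRec (cs : List Char) :
    ∀ k : Nat, ∀ acc : List Char,
      (PySem.List.pyRange k cs.length 1).foldl
        (fun tag i =>
          if PySem.List.pyGetD cs i ' ' = ' ' then tag
          else if i = 0 ∨ PySem.List.pyGetD cs (i - 1) ' ' = ' ' then tag ++ ['B']
          else tag ++ ['C']) acc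
        = acc ++ pvTagRec (if k = 0 then ' ' else cs.getD (k - 1) ' ') (cs.drop k) := by
  intro k
  induction hn : cs.length - k generalizing k with
  | zero =>
      intro acc
      have hk : cs.length ≤ k := by omega
      have : PySem.List.pyRange (k : Int) cs.length 1 = [] := by
        simp [PySem.List.pyRange]; omega
      rw [this]
      rw [List.drop_eq_nil_of_le hk]
      simp [pvTagRec]
  | succ n ih =>
      intro acc
      have hk : k < cs.length := by omega
      have hcons : PySem.List.pyRange (k : Int) cs.length 1
          = (k : Int) :: PySem.List.pyRange ((k : Int) + 1) cs.length 1 := by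
        apply PySem.List.pyRange_one_cons
        exact_mod_cast hk
      have hk1 : ((k : Int) + 1) = ((k + 1 : Nat) : Int) := by push_cast; ring
      have hgetd : cs.getD k ' ' = cs[k] := List.getD_eq_getElem cs ' ' hk
      have hdrop : cs.drop k = cs[k] :: cs.drop (k + 1) := List.drop_eq_getElem_cons hk
      have ihk := ih (k + 1) (by omega)
      rw [hcons, List.foldl_cons, hk1, ihk]
      have hprev2 : (if k + 1 = 0 then ' ' else cs.getD (k + 1 - 1) ' ') = cs[k] := by
        simp [List.getElem?_eq_getElem hk]
      rw [hprev2, hdrop]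
      rw [show pvTagRec (if k = 0 then ' ' else cs.getD (k - 1) ' ') (cs[k] :: cs.drop (k + 1))
            = (if cs[k] = ' ' then []
               else if (if k = 0 then ' ' else cs.getD (k - 1) ' ') = ' ' then ['B'] else ['C'])
              ++ pvTagRec cs[k] (cs.drop (k + 1)) from rfl]
      have hpg : PySem.List.pyGetD cs (k : Int) ' ' = cs[k] := by
        rw [PySem.List.pyGetD_natCast]; exact hgetd
      by_cases hsp : cs[k] = ' '
      · simp [hpg, hsp]
      · by_cases h0 : k = 0
        · subst h0
          simp only [Nat.cast_zero] at hpg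
          simp [hpg, hsp]
        · have hk0 : ((k : Int)) ≠ 0 := by exact_mod_cast h0
          have hk1' : ((k : Int) - 1) = ((k - 1 : Nat) : Int) := by omega
          have hpg1 : PySem.List.pyGetD cs ((k : Int) - 1) ' ' = cs.getD (k - 1) ' ' := by
            rw [hk1', PySem.List.pyGetD_natCast]
          by_cases hpv : cs.getD (k - 1) ' ' = ' '
          · have hpv' := hpv
            rw [List.getD_eq_getElem?_getD] at hpv'
            simp [hpg, hsp, h0, hpg1, hpv']
          · have hpv' := hpv
            rw [List.getD_eq_getElem?_getD] at hpv'
            simp [hpg, hsp, h0, hpg1, hpv']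

-- ===== VERDICT (by name: the statement is the Claim_ definition above) =====
set_option maxRecDepth 4000 in
theorem tag_text_spec : Claim_equal_tag_text := by
  intro text _
  unfold Spec_tag_text tag_text tag_text_alt
  dsimp only
  -- cleaning phase: both sides produce the same stripped char list
  have hclean :
      (PySem.Str.strip ("!\"#$%&'()*+,-./:;<=>?@[\\]^_`{|}~".toList.foldl
          (fun t m => PySem.Str.replace t (String.ofList [m]) " ") (PySem.Str.replace text "'" ""))).toList
      = PySem.Chars.strip ((text.toList.filter (fun c => c != '\'')).map
          (fun c => if c ∈ pvPunct then ' ' else c)) := by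
    have hfold : ∀ (ms : List Char) (s : String),
        (ms.foldl (fun t m => PySem.Str.replace t (String.ofList [m]) " ") s).toList
          = ms.foldl (fun t m => t.map (fun x => if x = m then ' ' else x)) s.toList := by
      intro ms
      induction ms with
      | nil => intro s; rfl
      | cons m ms' ih =>
          intro s
          simp only [List.foldl_cons]
          rw [ih]
          congr 1
          rw [PySem.Str.toList_replace, String.toList_ofList,
              show (" " : String).toList = [' '] from rfl]
          exact pvReplace_subst s.toList m ' '
    have h1 : (PySem.Str.replace text "'" "").toList = text.toList.filter (fun c => c != '\'') := by
      rw [PySem.Str.toList_replace, show ("'" : String).toList = ['\''] from rfl,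
          show ("" : String).toList = [] from rfl]
      exact pvReplace_del text.toList '\''
    rw [PySem.Str.toList_strip, hfold, h1, pvSubstFold _ (by decide)]
    simp [pvPunct]
  rw [hclean]
  set cs := PySem.Chars.strip ((text.toList.filter (fun c => c != '\'')).map
      (fun c => if c ∈ pvPunct then ' ' else c)) with hcs
  refine congrArg String.ofList ?_
  have hloop := pvLoop_eq_tagRec cs 0 []
  simp only [Nat.cast_zero, List.drop_zero, if_true, List.nil_append] at hloop
  have hsplit := pvSplit_tag cs []
  simp only [if_true, List.nil_append] at hsplit
  rw [hloop, pvSplitOn_space, pvJoinNil]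
  rw [show (fun w : List Char => 'B' :: List.replicate (w.length - 1) 'C') = pvWt from rfl]
  exact hsplit.symm
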